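-- pv_equiv track=rewrite | github.com/snykk/Competitive-Programming | Codewars/Python/Kyu6_Inside out strings.py | inside_out
-- ===== SOURCE A (Python) =====
-- def inside_out(st):
--     st += " "
--     result = ""
--     word = ""
--     for i in st:
--         if i != " ":
--             word += i
--         else:
--             div = len(word)//2-1
--             result += word[div::-1]
--             if len(word)%2 != 0 and len(word) != 1:
--                 result += word[div+1]
--                 result += word[:div+1:-1]
--             elif len(word)%2 == 0:
--                 result += word[:div:-1]
--             word = ""
--             result += i
--     return result[:-1]
-- ===== SOURCE B (Python) =====
-- def _flip(w):
--     n = len(w)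
--     h = n // 2
--     return w[:h][::-1] + (w[h] if n % 2 else "") + w[h + n % 2:][::-1]
--
--
-- def inside_out(st):
--     return " ".join(_flip(w) for w in st.split(" "))
-- ===== Notes on version B (the rewrite author's own statement) =====
-- stated objective: simpler
-- what changed: A builds the result in a single character-by-character scan with a word accumulator, in-loop flushing and a sentinel trailing space sliced off at the end; B instead splits the string on single spaces, maps a small flip helper (reverse each half around the midpoint) over the tokens, and joins them with spaces, avoiding A's repeated string concatenation.
import Mathlib
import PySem

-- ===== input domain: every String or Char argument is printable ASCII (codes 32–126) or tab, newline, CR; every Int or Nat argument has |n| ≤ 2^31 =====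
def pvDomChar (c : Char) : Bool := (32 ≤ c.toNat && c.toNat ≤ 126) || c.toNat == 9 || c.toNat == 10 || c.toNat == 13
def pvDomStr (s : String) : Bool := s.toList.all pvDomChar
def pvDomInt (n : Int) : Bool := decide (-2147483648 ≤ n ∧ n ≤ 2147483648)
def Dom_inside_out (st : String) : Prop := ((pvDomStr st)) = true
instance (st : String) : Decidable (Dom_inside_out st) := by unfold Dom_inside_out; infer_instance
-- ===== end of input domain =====

-- B replaces A's char-by-char scan (word accumulator, in-loop flush, sentinel space) by split-on-space / map-flip / join; objective: simpler.

-- ===== PORT A =====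
-- the body of A's for-loop; state = (result, word), both strings as List Char
def inside_out_step (acc : List Char × List Char) (i : Char) : List Char × List Char :=
  let result := acc.1
  let word := acc.2
  if i ≠ ' ' then (result, word ++ [i])
  else
    let div : Int := PySem.Int.floordiv (word.length : Int) 2 - 1
    -- result += word[div::-1]   (step -1 slice; never none since step ≠ 0)
    let r1 := result ++ (PySem.List.slice? word (some div) none (-1)).getD []
    let r2 :=
      if PySem.Int.mod (word.length : Int) 2 ≠ 0 ∧ (word.length : Int) ≠ 1 then
        -- result += word[div+1]; result += word[:div+1:-1]  (index in range in this branch; none unreachable)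
        r1 ++ (PySem.List.pyGet? word (div + 1)).toList
           ++ (PySem.List.slice? word none (some (div + 1)) (-1)).getD []
      else if PySem.Int.mod (word.length : Int) 2 = 0 then
        r1 ++ (PySem.List.slice? word none (some div) (-1)).getD []
      else r1
    (r2 ++ [i], [])

def inside_out (st : String) : String :=
  -- st += " "; loop; return result[:-1]
  let fin := (st.toList ++ [' ']).foldl inside_out_step ([], [])
  String.ofList fin.1.dropLast

-- ===== PORT B =====
-- _flip(w): reverse each half of w around its midpoint
def inside_out_flip (w : List Char) : List Char :=
  let n := w.length
  let h := n / 2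
  -- w[:h][::-1] + (w[h] if n % 2 else "") + w[h + n % 2:][::-1]
  (w.take h).reverse
    ++ (if n % 2 ≠ 0 then (PySem.List.pyGet? w (h : Int)).toList else [])
    ++ (w.drop (h + n % 2)).reverse

def inside_out_alt (st : String) : String :=
  -- " ".join(_flip(w) for w in st.split(" "))
  String.ofList (PySem.Chars.join [' '] ((PySem.Chars.splitOn st.toList [' ']).map inside_out_flip))

-- ===== PRECONDITION & SPEC =====
def Spec_inside_out (st : String) (out : String) : Prop := out = inside_out_alt st
instance (st : String) (out : String) : Decidable (Spec_inside_out st out) := by unfold Spec_inside_out; infer_instance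

-- ===== CLAIM (what is proved, stated in full; the proofs are below) =====
def Claim_equal_inside_out : Prop := ∀ (st : String), Dom_inside_out st → Spec_inside_out st (inside_out st)

-- ===== LEMMAS AND PROOFS =====

-- reference splitter: pvSplit pre l = the tokens of (pre ++ l) split on ' ', pre containing no space
def pvSplit (pre : List Char) : List Char → List (List Char)
  | [] => [pre]
  | c :: rest => if c = ' ' then pre :: pvSplit [] rest else pvSplit (pre ++ [c]) rest

lemma pvSplit_ne_nil (pre : List Char) (l : List Char) : pvSplit pre l ≠ [] := by
  induction l generalizing pre with
  | nil => simp [pvSplit]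
  | cons c rest ih =>
      by_cases h : c = ' ' <;> simp [pvSplit, h, ih]

lemma pvIntercalate_cons (x : List Char) (l : List (List Char)) (h : l ≠ []) :
    List.intercalate [' '] (x :: l) = x ++ ' ' :: List.intercalate [' '] l := by
  cases l with
  | nil => exact absurd rfl h
  | cons y t => simp [List.intercalate, List.intersperse]

-- negative-step slices: w[d::-1] and w[:d:-1] for 0 ≤ d < len w
lemma slice?_from_step_neg_one {α : Type} (w : List α) (d : Nat) (h : d < w.length) :
    PySem.List.slice? w (some (d : Int)) none (-1) = some ((w.take (d + 1)).reverse) := by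
  simp only [PySem.List.slice?, PySem.List.sliceIndices]
  norm_num
  rw [if_neg (by omega : ¬((d:Int) < 0))]
  rw [(by omega : min (d:Int) (↑w.length - 1) = d)]
  rw [if_pos (by omega : (-1:Int) < d)]
  rw [(by omega : ((d:Int) + 1).toNat = d + 1)]
  rw [show List.filterMap (fun k : Nat => w[((d:Int) + -(k:Int)).toNat]?) (List.range (d + 1))
        = List.map (fun k => w.getD (d - k) (w[d]'h)) (List.range (d + 1)) from
      List.filterMap_eq_map_iff_forall_eq_some.mpr (fun x hx => by
        have hx' : x ≤ d := Nat.lt_succ_iff.mp (List.mem_range.mp hx)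
        have hb : d - x < w.length := by omega
        rw [(by omega : ((d:Int) + -(x:Int)).toNat = d - x)]
        rw [List.getD_eq_getElem _ _ hb]
        exact List.getElem?_eq_getElem hb)]
  apply List.ext_getElem
  · simp; omega
  · intro i h1 h2
    simp only [List.getElem_map, List.getElem_range, List.getElem_reverse, List.getElem_take,
      List.length_take]
    simp only [List.length_map, List.length_range] at h1
    rw [List.getD_eq_getElem _ _ (by omega)]
    congr 1
    omega

lemma slice?_to_step_neg_one {α : Type} (w : List α) (d : Nat) (h : d < w.length) :
    PySem.List.slice? w none (some (d : Int)) (-1) = some ((w.drop (d + 1)).reverse) := by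
  simp only [PySem.List.slice?, PySem.List.sliceIndices]
  norm_num
  rw [if_neg (by omega : ¬((d:Int) < 0))]
  rw [(by omega : min (d:Int) (↑w.length - 1) = d)]
  rw [show (if (d:Int) < ↑w.length - 1 then ((w.length:Int) - 1 - ↑d).toNat else 0)
        = w.length - 1 - d from by split_ifs <;> omega]
  rw [show List.filterMap (fun k : Nat => w[((w.length:Int) - 1 + -(k:Int)).toNat]?)
        (List.range (w.length - 1 - d))
        = List.map (fun k => w.getD (w.length - 1 - k) (w[d]'h)) (List.range (w.length - 1 - d)) from
      List.filterMap_eq_map_iff_forall_eq_some.mpr (fun x hx => by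
        have hx' : x < w.length - 1 - d := List.mem_range.mp hx
        have hb : w.length - 1 - x < w.length := by omega
        rw [(by omega : ((w.length:Int) - 1 + -(x:Int)).toNat = w.length - 1 - x)]
        rw [List.getD_eq_getElem _ _ hb]
        exact List.getElem?_eq_getElem hb)]
  apply List.ext_getElem
  · simp; omega
  · intro i h1 h2
    simp only [List.getElem_map, List.getElem_range, List.getElem_reverse, List.getElem_drop,
      List.length_drop]
    simp only [List.length_map, List.length_range] at h1
    rw [List.getD_eq_getElem _ _ (by omega)]
    congr 1
    omega

-- the value A's flush appends for one word (before the trailing space)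
def flipAword (word : List Char) : List Char :=
  let div : Int := PySem.Int.floordiv (word.length : Int) 2 - 1
  (PySem.List.slice? word (some div) none (-1)).getD []
    ++ (if PySem.Int.mod (word.length : Int) 2 ≠ 0 ∧ (word.length : Int) ≠ 1 then
          (PySem.List.pyGet? word (div + 1)).toList
            ++ (PySem.List.slice? word none (some (div + 1)) (-1)).getD []
        else if PySem.Int.mod (word.length : Int) 2 = 0 then
          (PySem.List.slice? word none (some div) (-1)).getD []
        else [])

lemma step_space (res word : List Char) :
    inside_out_step (res, word) ' ' = (res ++ flipAword word ++ [' '], []) := by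
  unfold inside_out_step flipAword
  rw [if_neg (by simp)]
  split_ifs <;> simp

lemma step_char (res word : List Char) (c : Char) (h : c ≠ ' ') :
    inside_out_step (res, word) c = (res, word ++ [c]) := by
  simp [inside_out_step, h]

-- A's whole flush equals B's flip, for every word
lemma flipAword_eq_of_two_le (w : List Char) (h2 : 2 ≤ w.length) :
    flipAword w = inside_out_flip w := by
  simp only [flipAword, inside_out_flip]
  have hfd : PySem.Int.floordiv (w.length:Int) 2 = ((w.length / 2 : Nat) : Int) := by
    exact_mod_cast PySem.Int.floordiv_natCast w.length 2
  have hmd : PySem.Int.mod (w.length:Int) 2 = ((w.length % 2 : Nat) : Int) := by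
    exact_mod_cast PySem.Int.mod_natCast w.length 2
  rw [hfd, hmd]
  have hh1 : 1 ≤ w.length / 2 := by omega
  rw [show ((w.length / 2 : Nat) : Int) - 1 = ((w.length / 2 - 1 : Nat) : Int) from by omega]
  rw [slice?_from_step_neg_one w (w.length / 2 - 1) (by omega)]
  rcases Nat.mod_two_eq_zero_or_one w.length with he | ho
  · rw [he]
    rw [if_neg (by simp)]
    rw [if_pos (by simp)]
    rw [slice?_to_step_neg_one w (w.length / 2 - 1) (by omega)]
    rw [if_neg (by simp)]
    simp only [Option.getD_some]
    rw [show w.length / 2 - 1 + 1 = w.length / 2 from by omega]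
    simp
  · rw [ho]
    rw [if_pos ⟨by norm_num, by omega⟩]
    rw [show ((w.length / 2 - 1 : Nat) : Int) + 1 = ((w.length / 2 : Nat) : Int) from by omega]
    rw [slice?_to_step_neg_one w (w.length / 2) (by omega)]
    rw [if_pos (by simp)]
    simp only [Option.getD_some]
    rw [show w.length / 2 - 1 + 1 = w.length / 2 from by omega]
    simp

lemma flipAword_eq (w : List Char) : flipAword w = inside_out_flip w := by
  by_cases h2 : 2 ≤ w.length
  · exact flipAword_eq_of_two_le w h2
  · rcases w with _ | ⟨c, _ | ⟨c2, rest⟩⟩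
    · decide
    · simp [flipAword, inside_out_flip, PySem.List.slice?, PySem.List.sliceIndices,
        PySem.Int.floordiv, PySem.Int.mod, PySem.List.pyGet?, PySem.List.pyIdx?]
    · simp at h2

-- A's loop produces intercalate-of-flips
lemma loopA (cs : List Char) : ∀ res word : List Char,
    (List.foldl inside_out_step (res, word) (cs ++ [' '])).1
      = res ++ List.intercalate [' '] ((pvSplit word cs).map flipAword) ++ [' '] := by
  induction cs with
  | nil =>
      intro res word
      simp [List.foldl, step_space, pvSplit, List.intercalate]
  | cons c rest ih =>
      intro res word
      by_cases h : c = ' '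
      · subst h
        simp only [List.cons_append, List.foldl_cons, step_space]
        rw [ih]
        rw [show pvSplit word (' ' :: rest) = word :: pvSplit [] rest from by simp [pvSplit]]
        rw [List.map_cons, pvIntercalate_cons _ _ (by simp [pvSplit_ne_nil])]
        simp
      · simp only [List.cons_append, List.foldl_cons, step_char _ _ _ h]
        rw [ih]
        rw [show pvSplit word (c :: rest) = pvSplit (word ++ [c]) rest from by simp [pvSplit, h]]

-- PySem.Chars.splitOn on a single space is pvSplit
lemma splitOn_go_eq : ∀ (fuel : Nat) (l cur : List Char) (acc : List (List Char)),
    l.length < fuel →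
    PySem.Chars.splitOn.go [' '] fuel l cur acc = acc.reverse ++ pvSplit cur.reverse l := by
  intro fuel
  induction fuel with
  | zero => intro l cur acc h; omega
  | succ f ih =>
      intro l cur acc h
      cases l with
      | nil => rw [PySem.Chars.splitOn.go.eq_def]; simp [pvSplit]
      | cons c rest =>
          rw [PySem.Chars.splitOn.go.eq_def]
          dsimp only
          by_cases hc : c = ' '
          · subst hc
            rw [if_pos (by simp [List.isPrefixOf])]
            rw [ih _ _ _ (by simpa using Nat.lt_of_succ_lt_succ h)]
            simp [pvSplit]
          · rw [if_neg (by simp [List.isPrefixOf]; exact fun h' => hc h'.symm)]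
            rw [ih _ _ _ (by simpa using Nat.lt_of_succ_lt_succ h)]
            simp [pvSplit, hc]

lemma splitOn_eq (s : List Char) : PySem.Chars.splitOn s [' '] = pvSplit [] s := by
  have := splitOn_go_eq (s.length + 1) s [] [] (by omega)
  simpa [PySem.Chars.splitOn] using this

-- ===== VERDICT (by name: the statement is the Claim_ definition above) =====
theorem inside_out_spec : Claim_equal_inside_out := by
  intro st _
  show inside_out st = inside_out_alt st
  unfold inside_out inside_out_alt
  dsimp only
  rw [loopA st.toList [] []]
  rw [splitOn_eq]
  rw [show flipAword = inside_out_flip from funext flipAword_eq]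
  simp [PySem.Chars.join]
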